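-- pv_equiv track=rewrite | github.com/MagonBorn/CodeChallenges | CodeWars/0014-HorseStamina.py | estimatorThree
-- ===== SOURCE A (Python) =====
-- def estimatorThree(obstacles, stamina):
--     cost = 2
--     for i in obstacles:
--         if i:
--             stamina -= cost
--             cost += (cost // 2 + cost % 2)
--         else:
--             cost = 2
--     return stamina >= 0
-- ===== SOURCE B (Python) =====
-- def _run_cost(k):
--     """Total stamina cost of a maximal run of k consecutive truthy obstacles."""
--     total, cost = 0, 2
--     for _ in range(k):
--         total += cost
--         cost += (cost + 1) // 2
--     return total
--
--
-- def estimatorThree(obstacles, stamina):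
--     # First pass: collect the lengths of the maximal truthy runs.
--     runs = []
--     cur = 0
--     for x in obstacles:
--         if x:
--             cur += 1
--         else:
--             if cur:
--                 runs.append(cur)
--             cur = 0
--     if cur:
--         runs.append(cur)
--     # Second pass: one total subtraction.
--     return stamina - sum(_run_cost(k) for k in runs) >= 0
-- ===== Notes on version B (the rewrite author's own statement) =====
-- stated objective: alternative
-- what changed: B first run-length-encodes the obstacle list into maximal truthy-run lengths, then sums a per-run cost computed by a separate helper (with ceiling division (cost+1)//2) and subtracts the total from stamina once, instead of A's single flat loop mutating stamina and resetting cost inline.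
import Mathlib
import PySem

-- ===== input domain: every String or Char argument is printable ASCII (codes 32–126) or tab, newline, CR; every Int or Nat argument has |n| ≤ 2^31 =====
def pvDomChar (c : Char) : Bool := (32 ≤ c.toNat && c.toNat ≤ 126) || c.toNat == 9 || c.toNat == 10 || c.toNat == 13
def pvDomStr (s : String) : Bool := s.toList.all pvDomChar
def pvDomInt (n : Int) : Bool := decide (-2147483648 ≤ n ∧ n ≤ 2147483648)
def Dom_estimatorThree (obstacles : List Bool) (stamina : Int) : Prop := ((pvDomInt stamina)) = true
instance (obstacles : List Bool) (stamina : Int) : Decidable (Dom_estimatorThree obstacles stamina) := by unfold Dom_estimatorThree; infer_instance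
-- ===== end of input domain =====

-- B regroups the obstacles into maximal truthy runs and sums per-run costs; A is one flat loop.
-- Equivalence of the return value is proved for all inputs (both are total).
-- ===== PORT A =====
def estimatorThree (obstacles : List Bool) (stamina : Int) : Bool :=
  let st := obstacles.foldl
    (fun (s : Int × Int) (i : Bool) =>
      if i then (s.1 - s.2, s.2 + (PySem.Int.floordiv s.2 2 + PySem.Int.mod s.2 2))
      else (s.1, 2))
    (stamina, 2)
  decide (st.1 ≥ 0)

-- ===== PORT B =====
-- port of Source B's _run_cost: loop over range(k) carrying (total, cost)
def runCostAux : Nat → Int → Int → Int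
  | 0, _, total => total
  | k + 1, cost, total => runCostAux k (cost + PySem.Int.floordiv (cost + 1) 2) (total + cost)

def runCost (k : Nat) : Int := runCostAux k 2 0

def estimatorThree_alt (obstacles : List Bool) (stamina : Int) : Bool :=
  let p := obstacles.foldl
    (fun (p : List Nat × Nat) (x : Bool) =>
      if x then (p.1, p.2 + 1)
      else (if p.2 ≠ 0 then p.1 ++ [p.2] else p.1, 0))
    ([], 0)
  let runs := if p.2 ≠ 0 then p.1 ++ [p.2] else p.1
  decide (stamina - (runs.map runCost).sum ≥ 0)

-- ===== PRECONDITION & SPEC =====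
def Spec_estimatorThree (obstacles : List Bool) (stamina : Int) (out : Bool) : Prop := out = estimatorThree_alt obstacles stamina
instance (obstacles : List Bool) (stamina : Int) (out : Bool) : Decidable (Spec_estimatorThree obstacles stamina out) := by unfold Spec_estimatorThree; infer_instance

-- ===== CLAIM (what is proved, stated in full; the proofs are below) =====
def Claim_equal_estimatorThree : Prop := ∀ (obstacles : List Bool) (stamina : Int), Dom_estimatorThree obstacles stamina → Spec_estimatorThree obstacles stamina (estimatorThree obstacles stamina)

-- ===== LEMMAS AND PROOFS =====

-- cost after j consecutive truthy obstacles (A's cost variable within a run)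
def costSeq : Nat → Int
  | 0 => 2
  | j + 1 => costSeq j + (PySem.Int.floordiv (costSeq j) 2 + PySem.Int.mod (costSeq j) 2)

-- total cost of k further truthy obstacles when the current run already has length j
def Tc : Nat → Nat → Int
  | _, 0 => 0
  | j, k + 1 => costSeq j + Tc (j + 1) k

-- total stamina A subtracts over the rest of the list, current run length j
def T : List Bool → Nat → Int
  | [], _ => 0
  | true :: l, j => costSeq j + T l (j + 1)
  | false :: l, _ => T l 0

theorem ceil_bridge (c : Int) :
    PySem.Int.floordiv (c + 1) 2 = PySem.Int.floordiv c 2 + PySem.Int.mod c 2 := by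
  rw [PySem.Int.floordiv_eq_ediv_of_pos (by omega), PySem.Int.floordiv_eq_ediv_of_pos (by omega),
    PySem.Int.mod_eq_emod_of_pos (by omega)]
  omega

theorem foldlA_eq (l : List Bool) (s : Int) (j : Nat) :
    (l.foldl (fun (s : Int × Int) (i : Bool) =>
      if i then (s.1 - s.2, s.2 + (PySem.Int.floordiv s.2 2 + PySem.Int.mod s.2 2))
      else (s.1, 2)) (s, costSeq j)).1 = s - T l j := by
  induction l generalizing s j with
  | nil => simp [T]
  | cons x l ih =>
    cases x with
    | true =>
      have h1 : costSeq j + (PySem.Int.floordiv (costSeq j) 2 + PySem.Int.mod (costSeq j) 2)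
          = costSeq (j + 1) := rfl
      simp only [List.foldl_cons, if_true, h1, T]
      rw [ih]
      ring
    | false =>
      simpa [T, costSeq] using ih s 0

theorem Tc_succ_right (j k : Nat) : Tc j (k + 1) = Tc j k + costSeq (j + k) := by
  induction k generalizing j with
  | zero => simp [Tc]
  | succ k ih =>
    show costSeq j + Tc (j + 1) (k + 1) = costSeq j + Tc (j + 1) k + costSeq (j + (k + 1))
    rw [ih]
    have : j + 1 + k = j + (k + 1) := by omega
    rw [this]; ring

theorem runCostAux_eq (k j : Nat) (t : Int) : runCostAux k (costSeq j) t = t + Tc j k := by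
  induction k generalizing j t with
  | zero => simp [runCostAux, Tc]
  | succ k ih =>
    show runCostAux k (costSeq j + PySem.Int.floordiv (costSeq j + 1) 2) (t + costSeq j) = t + Tc j (k + 1)
    have h : costSeq j + PySem.Int.floordiv (costSeq j + 1) 2 = costSeq (j + 1) := by
      rw [ceil_bridge]; rfl
    rw [h, ih]
    show t + costSeq j + Tc (j + 1) k = t + (costSeq j + Tc (j + 1) k)
    ring

theorem runCost_eq (k : Nat) : runCost k = Tc 0 k := by
  have := runCostAux_eq k 0 0
  simpa [runCost, costSeq] using this

-- invariant for B's run-collecting fold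
theorem foldlB_eq (l : List Bool) (acc : List Nat) (j : Nat) :
    (let p := l.foldl (fun (p : List Nat × Nat) (x : Bool) =>
        if x then (p.1, p.2 + 1)
        else (if p.2 ≠ 0 then p.1 ++ [p.2] else p.1, 0)) (acc, j)
     ((if p.2 ≠ 0 then p.1 ++ [p.2] else p.1).map runCost).sum)
    = ((acc.map runCost).sum + Tc 0 j) + T l j := by
  induction l generalizing acc j with
  | nil =>
    cases j with
    | zero => simp [T, Tc, runCost, runCostAux]
    | succ j => simp [T, runCost_eq]
  | cons x l ih =>
    cases x with
    | true =>
      simp only [List.foldl_cons, if_true]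
      rw [ih, T, Tc_succ_right]
      simp; ring
    | false =>
      simp only [List.foldl_cons, Bool.false_eq_true, if_false]
      rw [ih, T]
      cases j with
      | zero => simp [Tc]
      | succ j =>
        simp only [Nat.succ_ne_zero, ne_eq, not_false_iff, if_true, List.map_append,
          List.map_cons, List.map_nil, List.sum_append, List.sum_cons, List.sum_nil,
          runCost_eq, Tc]
        ring

-- ===== VERDICT (by name: the statement is the Claim_ definition above) =====
theorem estimatorThree_spec : Claim_equal_estimatorThree := by
  intro obstacles stamina _
  unfold Spec_estimatorThree estimatorThree estimatorThree_alt
  have hA := foldlA_eq obstacles stamina 0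
  have hB := foldlB_eq obstacles [] 0
  simp only [costSeq] at hA
  simp only [List.map_nil, List.sum_nil, Tc, zero_add, add_zero] at hB
  simp only [hA, hB]
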